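-- pv_equiv track=rewrite | github.com/sgsw/CP_Algorithms | Algebra/ModularArithmetic/Factorial_modulo_p.py | factmod
-- ===== SOURCE A (Python) =====
-- def factmod(n, p):
--     """
--     constraints:
--         p is relatively small.
--
--     find pair (ord,q) : n! = (p^ord) * q
--     """
--     fact = [1]*(p)
--     for i in range(1, p):
--         fact[i] = fact[i - 1] * i % p
--     ord, q = 0, 1
--     while n > 1:
--         parity = n//p
--         if parity % 2 == 1:
--             q = p - q
--         q = q * fact[n % p] % p
--         n //= p
--         ord += n
--     return ord, q
-- ===== SOURCE B (Python) =====
-- def factmod(n, p):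
--     """
--     constraints:
--         p is relatively small.
--
--     find pair (ord,q) : n! = (p^ord) * q
--     """
--     fact = [1] * p
--     for i in range(1, p):
--         fact[i] = fact[i - 1] * i % p
--     # digits of n in base p (loop while > 1, as in the classic algorithm)
--     digits = []
--     m = n
--     while m > 1:
--         digits.append(m % p)
--         m //= p
--     q = 1
--     for d in digits:
--         q = q * fact[d] % p
--     # Legendre loop for ord
--     ord = 0
--     m = n
--     while m > 1:
--         m //= p
--         ord += m
--     # single Wilson sign flip: parity of ord = parity of the number of odd quotients
--     if ord % 2 == 1:
--         q = (p - q) % p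
--     return ord, q
-- ===== Notes on version B (the rewrite author's own statement) =====
-- stated objective: alternative
-- what changed: Replaces A's single interleaved loop (per-step Wilson sign flip mixed into the running product) by three separate passes: build the base-p digit list, fold the factorial product over it, compute ord with a Legendre loop, and apply one final sign flip when ord is odd.
import Mathlib
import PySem

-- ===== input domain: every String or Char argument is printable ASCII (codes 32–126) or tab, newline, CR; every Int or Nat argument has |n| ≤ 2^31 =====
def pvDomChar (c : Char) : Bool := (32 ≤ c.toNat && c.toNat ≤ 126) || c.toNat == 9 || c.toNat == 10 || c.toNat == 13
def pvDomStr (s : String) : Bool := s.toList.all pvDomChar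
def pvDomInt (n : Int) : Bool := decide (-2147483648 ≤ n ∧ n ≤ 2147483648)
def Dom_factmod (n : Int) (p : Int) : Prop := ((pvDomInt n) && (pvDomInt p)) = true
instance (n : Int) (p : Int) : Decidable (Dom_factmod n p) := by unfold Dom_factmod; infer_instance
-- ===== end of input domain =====

-- B splits A's interleaved loop into digit list + product fold + Legendre loop + one final sign flip (alternative decomposition, same cost).

-- ===== PORT A =====
-- fact = [1]*p; for i in range(1,p): fact[i] = fact[i-1] * i % p.
-- Built incrementally (fact[i-1] is the last element written so far); for p ≤ 1 the table is
-- never read under Pre_ (the while loop does not run), so its exact shape there is immaterial.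
-- termination helper for the three loops (cited by name in decreasing_by)
theorem pvDivLt (a b : Int) (ha : 1 < a) (hb : 2 ≤ b) :
    (PySem.Int.floordiv a b).toNat < a.toNat := by
  have hd : PySem.Int.floordiv a b = a / b := PySem.Int.floordiv_eq_ediv_of_pos (by omega)
  have h1 := Int.mul_ediv_add_emod a b
  have h2 := Int.emod_nonneg a (by omega : b ≠ 0)
  have h3 := Int.emod_lt_of_pos a (by omega : 0 < b)
  have h4 : 0 ≤ a / b := Int.ediv_nonneg (by omega) (by omega)
  have h5 : 2 * (a / b) ≤ b * (a / b) := mul_le_mul_of_nonneg_right hb h4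
  rw [hd]
  omega

def pvFact (p : Int) : List Int :=
  -- for i in range(1, p): fact[i] = fact[i-1] * i % p.  The same entries in the same
  -- order; the list is accumulated head-first (head = entry written last) for linear
  -- cost and reversed at the end.
  ((PySem.List.pyRange 1 p 1).foldl
      (fun acc i => PySem.Int.mod (acc.headI * i) p :: acc) [1]).reverse

-- while n > 1: parity = n//p; if parity % 2 == 1: q = p - q; q = q*fact[n%p] % p; n //= p; ord += n
-- The '2 ≤ p' conjunct is a totality guard only (Python diverges for p = 1 and raises for p ≤ 0
-- when n > 1; those inputs are outside Pre_); fact[n % p] uses getD 0 for the same reason.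
def pvLoopA (p : Int) (fact : List Int) (n ord q : Int) : Int × Int :=
  if h : 1 < n ∧ 2 ≤ p then
    let parity := PySem.Int.floordiv n p
    let q1 := if PySem.Int.mod parity 2 = 1 then p - q else q
    let q2 := PySem.Int.mod (q1 * ((PySem.List.pyGet? fact (PySem.Int.mod n p)).getD 0)) p
    pvLoopA p fact parity (ord + parity) q2
  else (ord, q)
termination_by n.toNat
decreasing_by exact pvDivLt _ _ h.1 h.2

def factmod (n : Int) (p : Int) : Int × Int := pvLoopA p (pvFact p) n 0 1

-- ===== PORT B =====
-- digits = []; m = n; while m > 1: digits.append(m % p); m //= p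
def pvDigits (p n : Int) : List Int :=
  if h : 1 < n ∧ 2 ≤ p then
    PySem.Int.mod n p :: pvDigits p (PySem.Int.floordiv n p)
  else []
termination_by n.toNat
decreasing_by exact pvDivLt _ _ h.1 h.2

-- ord = 0; m = n; while m > 1: m //= p; ord += m
def pvLeg (p m ord : Int) : Int :=
  if h : 1 < m ∧ 2 ≤ p then
    pvLeg p (PySem.Int.floordiv m p) (ord + PySem.Int.floordiv m p)
  else ord
termination_by m.toNat
decreasing_by exact pvDivLt _ _ h.1 h.2

def factmod_alt (n : Int) (p : Int) : Int × Int :=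
  let fact := pvFact p
  let q := (pvDigits p n).foldl
    (fun q d => PySem.Int.mod (q * ((PySem.List.pyGet? fact d).getD 0)) p) 1
  let ord := pvLeg p n 0
  (ord, if PySem.Int.mod ord 2 = 1 then PySem.Int.mod (p - q) p else q)

-- ===== PRECONDITION & SPEC =====
-- Pre_ excludes exactly the inputs where A does not return: for n > 1, A raises
-- (IndexError/ZeroDivisionError) when p ≤ 0 and loops forever when p = 1.
def Pre_factmod (n : Int) (p : Int) : Prop := 2 ≤ p ∨ n ≤ 1
instance (n : Int) (p : Int) : Decidable (Pre_factmod n p) := by unfold Pre_factmod; infer_instance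
def pvWitness_factmod : Int × Int := (10, 3)

def Spec_factmod (n : Int) (p : Int) (out : Int × Int) : Prop := out = factmod_alt n p
instance (n : Int) (p : Int) (out : Int × Int) : Decidable (Spec_factmod n p out) := by unfold Spec_factmod; infer_instance

-- ===== CLAIM (what is proved, stated in full; the proofs are below) =====
def Claim_equal_factmod : Prop := ∀ (n : Int) (p : Int), Dom_factmod n p → Pre_factmod n p → Spec_factmod n p (factmod n p)

-- ===== LEMMAS AND PROOFS =====


-- q * fact[d] % p applied along the digit list, as in B's fold
def pvGetf (fact : List Int) (d : Int) : Int := (PySem.List.pyGet? fact d).getD 0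

def pvProd (p : Int) (fact : List Int) (n : Int) : Int :=
  ((pvDigits p n).map (pvGetf fact)).prod

def pvSgn (p n : Int) : Int := if pvLeg p n 0 % 2 = 1 then -1 else 1

theorem pvModAbsorb (p a b c : Int) : (a * (b % p) * c) % p = (a * b * c) % p := by
  have h1 : a * (b % p) * c = (b % p) * (a * c) := by ring
  have h2 : a * b * c = b * (a * c) := by ring
  rw [h1, h2, Int.mul_emod, Int.emod_emod_of_dvd _ dvd_rfl, ← Int.mul_emod]

theorem pvLeg_shift (p : Int) (hp : 2 ≤ p) : ∀ k m ord, m.toNat ≤ k →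
    pvLeg p m ord = ord + pvLeg p m 0 := by
  intro k
  induction k with
  | zero =>
      intro m ord hm
      have hnc : ¬ (1 < m ∧ 2 ≤ p) := by intro ⟨h1, _⟩; omega
      conv_lhs => rw [pvLeg]
      conv_rhs => rw [pvLeg]
      simp [hnc]
  | succ k ih =>
      intro m ord hm
      by_cases hc : 1 < m ∧ 2 ≤ p
      · have hlt := pvDivLt m p hc.1 hc.2
        conv_lhs => rw [pvLeg]
        conv_rhs => rw [pvLeg]
        simp only [dif_pos hc]
        rw [ih _ (ord + PySem.Int.floordiv m p) (by omega),
            ih _ (0 + PySem.Int.floordiv m p) (by omega)]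
        ring
      · conv_lhs => rw [pvLeg]
        conv_rhs => rw [pvLeg]
        simp [hc]

theorem pvLeg_nonneg (p : Int) (hp : 2 ≤ p) : ∀ k m ord, m.toNat ≤ k → 0 ≤ ord →
    0 ≤ pvLeg p m ord := by
  intro k
  induction k with
  | zero =>
      intro m ord hm ho
      have hnc : ¬ (1 < m ∧ 2 ≤ p) := by intro ⟨h1, _⟩; omega
      rw [pvLeg]; simpa [hnc] using ho
  | succ k ih =>
      intro m ord hm ho
      by_cases hc : 1 < m ∧ 2 ≤ p
      · rw [pvLeg]
        simp only [dif_pos hc]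
        have hlt := pvDivLt m p hc.1 hc.2
        have hd : PySem.Int.floordiv m p = m / p := PySem.Int.floordiv_eq_ediv_of_pos (by omega)
        have hnn : 0 ≤ m / p := Int.ediv_nonneg (by omega) (by omega)
        exact ih _ _ (by omega) (by rw [hd]; omega)
      · rw [pvLeg]; simpa [hc] using ho

-- the crux: A's interleaved loop computes leg for ord and ±(q·∏fact[d]) mod p for q
theorem pvLoopA_eq (p : Int) (fact : List Int) (hp : 2 ≤ p) : ∀ k n ord q, n.toNat ≤ k → 1 < n →
    pvLoopA p fact n ord q =
      (pvLeg p n ord, (pvSgn p n * q * pvProd p fact n) % p) := by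
  intro k
  induction k with
  | zero => intro n ord q hk hn; omega
  | succ k ih =>
      intro n ord q hk hn
      have hc : 1 < n ∧ 2 ≤ p := ⟨hn, hp⟩
      have hd : PySem.Int.floordiv n p = n / p := PySem.Int.floordiv_eq_ediv_of_pos (by omega)
      have hm : PySem.Int.mod n p = n % p := PySem.Int.mod_eq_emod_of_pos (by omega)
      have hm2 : ∀ x : Int, PySem.Int.mod x 2 = x % 2 := fun x => PySem.Int.mod_eq_emod_of_pos (by omega)
      have hmp : ∀ x : Int, PySem.Int.mod x p = x % p := fun x => PySem.Int.mod_eq_emod_of_pos (by omega)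
      have hlt := pvDivLt n p hn hp
      set n' := n / p with hn'def
      have hn'0 : 0 ≤ n' := Int.ediv_nonneg (by omega) (by omega)
      -- unfold one step of everything
      rw [pvLoopA]
      simp only [dif_pos hc, hd, hm, hm2, hmp]
      rw [pvLeg]
      simp only [dif_pos hc, hd]
      have hdig : pvDigits p n = n % p :: pvDigits p n' := by
        rw [pvDigits]; simp only [dif_pos hc, hd, hm]
      have hprod : pvProd p fact n = (PySem.List.pyGet? fact (n % p)).getD 0 * pvProd p fact n' := by
        simp [pvProd, hdig, pvGetf]
      set f := (PySem.List.pyGet? fact (n % p)).getD 0 with hfdef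
      have hleg : pvLeg p n 0 = n' + pvLeg p n' 0 := by
        rw [pvLeg]
        simp only [dif_pos hc, hd]
        rw [pvLeg_shift p hp n'.toNat n' (0 + n') le_rfl]
        ring
      by_cases hn'1 : 1 < n'
      · -- recursive case
        rw [ih n' (ord + n') _ (by omega) hn'1]
        refine Prod.ext rfl ?_
        simp only [hprod]
        rw [pvModAbsorb]
        have hleg'0 : 0 ≤ pvLeg p n' 0 := pvLeg_nonneg p hp n'.toNat n' 0 le_rfl le_rfl
        simp only [pvSgn, hleg]
        rcases Int.emod_two_eq n' with hpar | hpar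
        · rw [if_neg (by omega : ¬ n' % 2 = 1)]
          by_cases hl : pvLeg p n' 0 % 2 = 1
          · rw [if_pos hl, if_pos (by omega : (n' + pvLeg p n' 0) % 2 = 1)]
            congr 1; ring
          · rw [if_neg hl, if_neg (by omega : ¬ (n' + pvLeg p n' 0) % 2 = 1)]
            congr 1; ring
        · rw [if_pos hpar]
          by_cases hl : pvLeg p n' 0 % 2 = 1
          · rw [if_pos hl, if_neg (by omega : ¬ (n' + pvLeg p n' 0) % 2 = 1)]
            have he : -1 * ((p - q) * f) * pvProd p fact n'
                = 1 * q * (f * pvProd p fact n') + p * (-(f * pvProd p fact n')) := by ring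
            rw [he, Int.add_mul_emod_self_left]
          · rw [if_neg hl, if_pos (by omega : (n' + pvLeg p n' 0) % 2 = 1)]
            have he : 1 * ((p - q) * f) * pvProd p fact n'
                = -1 * q * (f * pvProd p fact n') + p * (f * pvProd p fact n') := by ring
            rw [he, Int.add_mul_emod_self_left]
      · -- base: n / p ≤ 1, the recursion stops after this step
        have hnc : ¬ (1 < n' ∧ 2 ≤ p) := fun hx => hn'1 hx.1
        rw [pvLoopA, pvLeg]
        simp only [dif_neg hnc]
        refine Prod.ext rfl ?_
        have hdig' : pvDigits p n' = [] := by rw [pvDigits]; simp [hnc]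
        have hleg0 : pvLeg p n' 0 = 0 := by rw [pvLeg]; simp [hnc]
        have hP' : pvProd p fact n' = 1 := by simp [pvProd, hdig']
        rw [hprod, hP']
        simp only [pvSgn, hleg, hleg0, add_zero]
        rcases Int.emod_two_eq n' with hpar | hpar
        · rw [if_neg (by omega : ¬ n' % 2 = 1), if_neg (by omega : ¬ n' % 2 = 1)]
          congr 1; ring
        · rw [if_pos hpar, if_pos hpar]
          have he : (p - q) * f = -1 * q * (f * 1) + p * f := by ring
          rw [he, Int.add_mul_emod_self_left]

-- B's fold with interleaved mods equals the plain product mod p (for a nonempty digit list)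
theorem pvFold_eq (p : Int) (fact : List Int) (hp : 2 ≤ p) :
    ∀ (ds : List Int) (q : Int), ds ≠ [] →
    ds.foldl (fun q d => PySem.Int.mod (q * ((PySem.List.pyGet? fact d).getD 0)) p) q
      = (q * (ds.map (pvGetf fact)).prod) % p := by
  intro ds
  induction ds with
  | nil => intro q h; exact absurd rfl h
  | cons d ds ih =>
      intro q _
      have hmp : ∀ x : Int, PySem.Int.mod x p = x % p := fun x =>
        PySem.Int.mod_eq_emod_of_pos (by omega)
      cases ds with
      | nil => simp [List.foldl, pvGetf, hmp]
      | cons e es =>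
          rw [List.foldl_cons, ih _ (by simp)]
          simp only [hmp, List.map_cons, List.prod_cons]
          rw [show q * (pvGetf fact d * (pvGetf fact e * ((es.map (pvGetf fact))).prod))
                = q * (PySem.List.pyGet? fact d).getD 0
                    * (pvGetf fact e * ((es.map (pvGetf fact))).prod) from by
            simp only [pvGetf]; ring]
          conv_lhs => rw [Int.mul_emod]
          conv_rhs => rw [Int.mul_emod]
          rw [Int.emod_emod_of_dvd _ dvd_rfl]

-- ===== VERDICT (by name: the statement is the Claim_ definition above) =====
theorem factmod_spec : Claim_equal_factmod := by
  intro n p _ hpre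
  unfold Spec_factmod factmod factmod_alt
  by_cases hn : 1 < n
  · have hp : 2 ≤ p := by unfold Pre_factmod at hpre; omega
    have hdig : pvDigits p n ≠ [] := by
      rw [pvDigits]; simp [show (1 < n ∧ 2 ≤ p) from ⟨hn, hp⟩]
    rw [pvLoopA_eq p (pvFact p) hp n.toNat n 0 1 le_rfl hn]
    simp only
    rw [pvFold_eq p (pvFact p) hp (pvDigits p n) 1 hdig]
    have hm2 : PySem.Int.mod (pvLeg p n 0) 2 = pvLeg p n 0 % 2 :=
      PySem.Int.mod_eq_emod_of_pos (by omega)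
    have hmp : ∀ x : Int, PySem.Int.mod x p = x % p := fun x =>
      PySem.Int.mod_eq_emod_of_pos (by omega)
    refine Prod.ext rfl ?_
    have hBP : ((pvDigits p n).map (pvGetf (pvFact p))).prod = pvProd p (pvFact p) n := rfl
    simp only [hm2, hmp, pvSgn, hBP, one_mul]
    set P := pvProd p (pvFact p) n
    by_cases hl : pvLeg p n 0 % 2 = 1
    · rw [if_pos hl, if_pos hl]
      have he : p - P % p = -1 * (P % p) + p * 1 := by ring
      rw [he, Int.add_mul_emod_self_left]
      conv_lhs => rw [Int.mul_emod]
      conv_rhs => rw [Int.mul_emod]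
      rw [Int.emod_emod_of_dvd _ dvd_rfl]
      norm_num
    · rw [if_neg hl, if_neg hl]
      norm_num
  · rw [pvLoopA, pvLeg, pvDigits]
    have hc : ¬ (1 < n ∧ 2 ≤ p) := fun hx => hn hx.1
    simp [hc, PySem.Int.mod]
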